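-- pv_equiv track=rewrite | github.com/Diesanzz/chess-automata | graficar_red_j1.py | construir_red_j1
-- ===== SOURCE A (Python) =====
-- def construir_red_j1(nfa, inicio, cadena):
--
--     red = []  # lista de aristas
--     nodos = set()
--
--     actuales = [(inicio, 0)]
--     nodos.add((inicio, 0))
--
--     for i, simbolo in enumerate(cadena):
--
--         nuevos = []
--
--         for (estado, nivel) in actuales:
--
--             for sig in nfa[estado][simbolo]:
--
--                 nodo_siguiente = (sig, i+1)
--
--                 red.append(((estado, nivel), nodo_siguiente))
--                 nodos.add(nodo_siguiente)
--                 nuevos.append(nodo_siguiente)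
--
--         actuales = nuevos
--
--     return nodos, red
-- ===== SOURCE B (Python) =====
-- def construir_red_j1(nfa, inicio, cadena):
--     # Recursive level expansion: each layer of edges is built by a comprehension,
--     # the next frontier is read back off the layer, and the node set is computed
--     # afterwards from the edge targets instead of being maintained inline.
--     def niveles(frontera, i):
--         if i == len(cadena):
--             return []
--         simbolo = cadena[i]
--         capa = [((estado, nivel), (sig, i + 1))
--                 for (estado, nivel) in frontera
--                 for sig in nfa[estado][simbolo]]
--         return capa + niveles([dst for (_src, dst) in capa], i + 1)
--
--     red = niveles([(inicio, 0)], 0)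
--     nodos = {(inicio, 0)} | {dst for (_src, dst) in red}
--     return nodos, red
-- ===== Notes on version B (the rewrite author's own statement) =====
-- stated objective: simpler
-- what changed: Replaces A's single imperative loop threading three mutable containers (red, nodos, actuales) with a recursive per-level expansion that builds each edge layer by a comprehension, derives the next frontier from the layer itself, and computes the node set in one separate pass from the edge targets afterwards.
import Mathlib
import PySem

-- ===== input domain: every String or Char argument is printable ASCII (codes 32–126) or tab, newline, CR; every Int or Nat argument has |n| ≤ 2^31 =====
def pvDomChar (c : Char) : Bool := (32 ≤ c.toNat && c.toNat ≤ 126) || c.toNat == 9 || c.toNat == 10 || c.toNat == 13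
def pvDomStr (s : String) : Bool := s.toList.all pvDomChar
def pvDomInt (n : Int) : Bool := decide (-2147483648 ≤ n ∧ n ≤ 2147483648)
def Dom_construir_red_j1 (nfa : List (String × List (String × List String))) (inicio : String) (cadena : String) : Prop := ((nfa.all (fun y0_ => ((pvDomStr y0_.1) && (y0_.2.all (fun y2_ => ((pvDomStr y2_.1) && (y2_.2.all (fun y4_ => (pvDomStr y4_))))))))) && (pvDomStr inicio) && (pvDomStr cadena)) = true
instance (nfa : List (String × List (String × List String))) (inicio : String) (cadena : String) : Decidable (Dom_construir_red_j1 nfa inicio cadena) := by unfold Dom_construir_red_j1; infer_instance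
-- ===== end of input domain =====

-- B builds the edge list by a recursive per-level expansion and computes the node
-- set afterwards from the edge targets, instead of A's single imperative loop that
-- threads (red, nodos, actuales) together; objective: simpler decomposition.

-- ===== PORT A =====
-- nfa[estado][simbolo]: under Pre_ both dict lookups succeed; getD's default [] is never used there
def pvTransA (nfa : List (String × List (String × List String))) (estado : String) (simbolo : Char) : List String :=
  (PySem.Dict.mk ((PySem.Dict.mk nfa).getD estado [])).getD (String.singleton simbolo) []

def construir_red_j1 (nfa : List (String × List (String × List String))) (inicio : String) (cadena : String) : (List (String × Int)) × (List ((String × Int) × (String × Int))) :=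
  -- state = (red, nodos, actuales), exactly A's three mutable variables
  let st := (PySem.List.enumerate cadena.toList 0).foldl
    (fun (st : List ((String × Int) × (String × Int)) × PySem.Set (String × Int) × List (String × Int)) (p : Int × Char) =>
      -- inner state = (red, nodos, nuevos)
      let inner := st.2.2.foldl
        (fun (st2 : List ((String × Int) × (String × Int)) × PySem.Set (String × Int) × List (String × Int)) (en : String × Int) =>
          (pvTransA nfa en.1 p.2).foldl
            (fun st3 sig =>
              (st3.1 ++ [(en, (sig, p.1 + 1))],
               PySem.Set.add st3.2.1 (sig, p.1 + 1),
               st3.2.2 ++ [(sig, p.1 + 1)]))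
            st2)
        (st.1, st.2.1, ([] : List (String × Int)))
      inner)
    (([] : List ((String × Int) × (String × Int))),
     PySem.Set.add PySem.Set.empty (inicio, 0),
     [(inicio, 0)])
  (st.2.1, st.1)

-- ===== PORT B =====
def pvNiveles (nfa : List (String × List (String × List String))) (cadena : List Char) (frontera : List (String × Int)) (i : Int) : List ((String × Int) × (String × Int)) :=
  match cadena with
  | [] => []
  | simbolo :: rest =>
    let capa := frontera.flatMap (fun en =>
      ((PySem.Dict.mk ((PySem.Dict.mk nfa).getD en.1 [])).getD (String.singleton simbolo) []).map
        (fun sig => (en, (sig, i + 1))))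
    capa ++ pvNiveles nfa rest (capa.map (fun e => e.2)) (i + 1)

def construir_red_j1_alt (nfa : List (String × List (String × List String))) (inicio : String) (cadena : String) : (List (String × Int)) × (List ((String × Int) × (String × Int))) :=
  let red := pvNiveles nfa cadena.toList [(inicio, 0)] 0
  let nodos := PySem.Set.union (PySem.Set.ofList [(inicio, 0)]) (red.map (fun e => e.2))
  (nodos, red)

-- ===== PRECONDITION & SPEC =====
-- Pre_ excludes the inputs where A raises KeyError. It asks for a total transition
-- table (inicio and every listed target are states, every state has an entry for
-- every symbol of cadena); this is slightly stronger than needed — A still returns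
-- when a missing entry sits only in a state the frontier never reaches.
def Pre_construir_red_j1 (nfa : List (String × List (String × List String))) (inicio : String) (cadena : String) : Prop :=
  (cadena.toList.isEmpty ||
   ((nfa.map Prod.fst).contains inicio &&
    nfa.all (fun p =>
      cadena.toList.all (fun c => (p.2.map Prod.fst).contains (String.singleton c)) &&
      p.2.all (fun q => q.2.all (fun t => (nfa.map Prod.fst).contains t))))) = true
instance (nfa : List (String × List (String × List String))) (inicio : String) (cadena : String) : Decidable (Pre_construir_red_j1 nfa inicio cadena) := by unfold Pre_construir_red_j1; infer_instance

def pvWitness_construir_red_j1 : (List (String × List (String × List String))) × String × String :=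
  ([("q0", [("a", ["q0", "q1"])]), ("q1", [("a", [])])], "q0", "aa")

def Spec_construir_red_j1 (nfa : List (String × List (String × List String))) (inicio : String) (cadena : String) (out : (List (String × Int)) × (List ((String × Int) × (String × Int)))) : Prop := out = construir_red_j1_alt nfa inicio cadena
instance (nfa : List (String × List (String × List String))) (inicio : String) (cadena : String) (out : (List (String × Int)) × (List ((String × Int) × (String × Int)))) : Decidable (Spec_construir_red_j1 nfa inicio cadena out) := by unfold Spec_construir_red_j1; infer_instance

-- ===== CLAIM (what is proved, stated in full; the proofs are below) =====
def Claim_equal_construir_red_j1 : Prop := ∀ (nfa : List (String × List (String × List String))) (inicio : String) (cadena : String), Dom_construir_red_j1 nfa inicio cadena → Pre_construir_red_j1 nfa inicio cadena → Spec_construir_red_j1 nfa inicio cadena (construir_red_j1 nfa inicio cadena)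

-- ===== LEMMAS AND PROOFS =====

-- innermost loop (over the targets of one frontier node)
theorem pvInner1 (en : String × Int) (i : Int)
    (sigs : List String) (r : List ((String × Int) × (String × Int)))
    (n : PySem.Set (String × Int)) (v : List (String × Int)) :
    sigs.foldl
      (fun st3 sig =>
        (st3.1 ++ [(en, (sig, i + 1))],
         PySem.Set.add st3.2.1 (sig, i + 1),
         st3.2.2 ++ [(sig, i + 1)]))
      (r, n, v)
    = (r ++ sigs.map (fun s => (en, (s, i + 1))),
       PySem.Set.update n (sigs.map (fun s => (s, i + 1))),
       v ++ sigs.map (fun s => (s, i + 1))) := by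
  induction sigs generalizing r n v with
  | nil => simp [PySem.Set.update]
  | cons s ss ih => simp [List.foldl_cons, ih, PySem.Set.update_cons]

-- middle loop (over the frontier), against B's comprehension capa
theorem pvInner2 (nfa : List (String × List (String × List String))) (c : Char) (i : Int)
    (actuales : List (String × Int)) (r : List ((String × Int) × (String × Int)))
    (n : PySem.Set (String × Int)) (v : List (String × Int)) :
    actuales.foldl
      (fun (st2 : List ((String × Int) × (String × Int)) × PySem.Set (String × Int) × List (String × Int)) (en : String × Int) =>
        (pvTransA nfa en.1 c).foldl
          (fun st3 sig =>
            (st3.1 ++ [(en, (sig, i + 1))],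
             PySem.Set.add st3.2.1 (sig, i + 1),
             st3.2.2 ++ [(sig, i + 1)]))
          st2)
      (r, n, v)
    = (r ++ actuales.flatMap (fun en => (pvTransA nfa en.1 c).map (fun s => (en, (s, i + 1)))),
       PySem.Set.update n ((actuales.flatMap (fun en => (pvTransA nfa en.1 c).map (fun s => (en, (s, i + 1))))).map (fun e => e.2)),
       v ++ (actuales.flatMap (fun en => (pvTransA nfa en.1 c).map (fun s => (en, (s, i + 1))))).map (fun e => e.2)) := by
  induction actuales generalizing r n v with
  | nil => simp [PySem.Set.update]
  | cons a as ih =>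
      simp only [List.foldl_cons, pvInner1, ih, List.flatMap_cons, List.map_append,
        List.append_assoc, PySem.Set.update_append, List.map_map]
      rfl

-- outer loop: A's fold over enumerate equals B's recursion pvNiveles
theorem pvOuter (nfa : List (String × List (String × List String))) (chars : List Char) (i : Int)
    (red : List ((String × Int) × (String × Int))) (nodos : PySem.Set (String × Int))
    (actuales : List (String × Int)) :
    ((PySem.List.enumerate chars i).foldl
      (fun (st : List ((String × Int) × (String × Int)) × PySem.Set (String × Int) × List (String × Int)) (p : Int × Char) =>
        st.2.2.foldl
          (fun (st2 : List ((String × Int) × (String × Int)) × PySem.Set (String × Int) × List (String × Int)) (en : String × Int) =>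
            (pvTransA nfa en.1 p.2).foldl
              (fun st3 sig =>
                (st3.1 ++ [(en, (sig, p.1 + 1))],
                 PySem.Set.add st3.2.1 (sig, p.1 + 1),
                 st3.2.2 ++ [(sig, p.1 + 1)]))
              st2)
          (st.1, st.2.1, ([] : List (String × Int)))
      ) (red, nodos, actuales)).1
    = red ++ pvNiveles nfa chars actuales i
    ∧ ((PySem.List.enumerate chars i).foldl
      (fun (st : List ((String × Int) × (String × Int)) × PySem.Set (String × Int) × List (String × Int)) (p : Int × Char) =>
        st.2.2.foldl
          (fun (st2 : List ((String × Int) × (String × Int)) × PySem.Set (String × Int) × List (String × Int)) (en : String × Int) =>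
            (pvTransA nfa en.1 p.2).foldl
              (fun st3 sig =>
                (st3.1 ++ [(en, (sig, p.1 + 1))],
                 PySem.Set.add st3.2.1 (sig, p.1 + 1),
                 st3.2.2 ++ [(sig, p.1 + 1)]))
              st2)
          (st.1, st.2.1, ([] : List (String × Int)))
      ) (red, nodos, actuales)).2.1
    = PySem.Set.update nodos ((pvNiveles nfa chars actuales i).map (fun e => e.2)) := by
  induction chars generalizing i red nodos actuales with
  | nil => simp [PySem.List.enumerate_nil, pvNiveles, PySem.Set.update]
  | cons c cs ih =>
      rw [PySem.List.enumerate_cons]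
      simp only [List.foldl_cons]
      rw [pvInner2]
      simp only [List.nil_append]
      obtain ⟨h1, h2⟩ := ih (i + 1)
        (red ++ actuales.flatMap (fun en => (pvTransA nfa en.1 c).map (fun s => (en, (s, i + 1)))))
        (PySem.Set.update nodos ((actuales.flatMap (fun en => (pvTransA nfa en.1 c).map (fun s => (en, (s, i + 1))))).map (fun e => e.2)))
        ((actuales.flatMap (fun en => (pvTransA nfa en.1 c).map (fun s => (en, (s, i + 1))))).map (fun e => e.2))
      constructor
      · rw [h1]
        simp only [pvNiveles, pvTransA, List.append_assoc]
      · rw [h2]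
        simp only [pvNiveles, pvTransA, List.map_append, PySem.Set.update_append]

-- ===== VERDICT (by name: the statement is the Claim_ definition above) =====
theorem construir_red_j1_spec : Claim_equal_construir_red_j1 := by
  intro nfa inicio cadena _ _
  unfold Spec_construir_red_j1 construir_red_j1 construir_red_j1_alt
  obtain ⟨h1, h2⟩ := pvOuter nfa cadena.toList 0 []
    (PySem.Set.add PySem.Set.empty (inicio, 0)) [(inicio, 0)]
  simp only [] at *
  rw [Prod.ext_iff]
  refine ⟨?_, ?_⟩
  · show _ = PySem.Set.union (PySem.Set.ofList [(inicio, 0)]) _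
    rw [h2]
    rfl
  · show _ = pvNiveles nfa cadena.toList [(inicio, 0)] 0
    rw [h1]
    rfl
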